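-- pv_equiv track=rewrite | github.com/ilayn/semicolon-lapack | scripts/gen_complex_single_tests.py | tokenize_line
-- ===== SOURCE A (Python) =====
-- def tokenize_line(line):
--     """Split a line into tagged segments.
--
--     Returns list of (tag, text) where tag is one of:
--         'code'          - C source code
--         'line_comment'  - // ... to end of line
--         'block_comment' - /* ... */ (complete on this line)
--         'block_start'   - /* ... (continues to next line)
--         'string'        - "..."
--         'char'          - '...'
--     """
--     segments = []
--     buf = []
--     i = 0
--     n = len(line)
--
--     while i < n:
--         # --- // line comment ---
--         if line[i] == "/" and i + 1 < n and line[i + 1] == "/":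
--             if buf:
--                 segments.append(("code", "".join(buf)))
--                 buf = []
--             segments.append(("line_comment", line[i:]))
--             return segments
--
--         # --- /* block comment --- */
--         if line[i] == "/" and i + 1 < n and line[i + 1] == "*":
--             if buf:
--                 segments.append(("code", "".join(buf)))
--                 buf = []
--             end = line.find("*/", i + 2)
--             if end >= 0:
--                 segments.append(("block_comment", line[i : end + 2]))
--                 i = end + 2
--             else:
--                 segments.append(("block_start", line[i:]))
--                 return segments
--             continue
--
--         # --- string literal ---
--         if line[i] == '"':
--             if buf:
--                 segments.append(("code", "".join(buf)))
--                 buf = []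
--             j = i + 1
--             while j < n:
--                 if line[j] == "\\":
--                     j += 2
--                 elif line[j] == '"':
--                     j += 1
--                     break
--                 else:
--                     j += 1
--             segments.append(("string", line[i:j]))
--             i = j
--             continue
--
--         # --- char literal ---
--         if line[i] == "'":
--             if buf:
--                 segments.append(("code", "".join(buf)))
--                 buf = []
--             j = i + 1
--             while j < n:
--                 if line[j] == "\\":
--                     j += 2
--                 elif line[j] == "'":
--                     j += 1
--                     break
--                 else:
--                     j += 1
--             segments.append(("char", line[i:j]))
--             i = j
--             continue
--
--         buf.append(line[i])
--         i += 1
--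
--     if buf:
--         segments.append(("code", "".join(buf)))
--
--     return segments
-- ===== SOURCE B (Python) =====
-- def _raw_segments(line):
--     """First pass: one raw segment per lexical event; code chars one at a time."""
--     raw = []
--     i = 0
--     n = len(line)
--     while i < n:
--         c = line[i]
--         if c == '"' or c == "'":
--             j = i + 1
--             esc = False
--             while j < n:
--                 ch = line[j]
--                 j += 1
--                 if esc:
--                     esc = False
--                 elif ch == c:
--                     break
--                 else:
--                     esc = (ch == '\\')
--             raw.append(('string' if c == '"' else 'char', line[i:j]))
--             i = j
--         elif c == '/' and line[i + 1:i + 2] == '/':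
--             raw.append(('line_comment', line[i:]))
--             return raw
--         elif c == '/' and line[i + 1:i + 2] == '*':
--             end = line.find('*/', i + 2)
--             if end < 0:
--                 raw.append(('block_start', line[i:]))
--                 return raw
--             raw.append(('block_comment', line[i:end + 2]))
--             i = end + 2
--         else:
--             raw.append(('code', c))
--             i += 1
--     return raw
--
--
-- def _merge(raw):
--     """Second pass: coalesce consecutive 'code' pieces into single segments."""
--     segments = []
--     pend = []
--     for tag, text in raw:
--         if tag == 'code':
--             pend.append(text)
--             continue
--         if pend:
--             segments.append(('code', ''.join(pend)))
--             pend = []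
--         segments.append((tag, text))
--     if pend:
--         segments.append(('code', ''.join(pend)))
--     return segments
--
--
-- def tokenize_line(line):
--     """Split a line into tagged segments (two-stage pipeline: raw events, then merge)."""
--     return _merge(_raw_segments(line))
-- ===== Notes on version B (the rewrite author's own statement) =====
-- stated objective: alternative
-- what changed: A is a single pass that accumulates code characters in a buffer inside the dispatch loop; B is a two-stage pipeline: pass 1 emits one raw tagged segment per lexical event (code characters individually, literals scanned with an escape-flag state machine instead of A's j+=2 skip), pass 2 coalesces adjacent code pieces.
import Mathlib
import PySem

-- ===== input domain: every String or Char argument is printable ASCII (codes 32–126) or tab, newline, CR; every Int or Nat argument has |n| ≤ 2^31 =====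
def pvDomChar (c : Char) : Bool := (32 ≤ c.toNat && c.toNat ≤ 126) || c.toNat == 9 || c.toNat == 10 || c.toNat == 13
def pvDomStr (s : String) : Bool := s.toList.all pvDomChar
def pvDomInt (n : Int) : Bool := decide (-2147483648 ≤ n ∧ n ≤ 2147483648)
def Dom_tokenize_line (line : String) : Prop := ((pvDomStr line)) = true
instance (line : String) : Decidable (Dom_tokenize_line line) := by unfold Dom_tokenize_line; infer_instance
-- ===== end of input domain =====

-- B restructures A's single-pass buffered state machine as a two-stage pipeline: pass 1 emits one raw
-- segment per lexical event (code characters individually, via an escape-flag literal scan), pass 2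
-- coalesces adjacent code pieces; objective: alternative decomposition, not claimed faster.

-- ===== PORT A =====

-- `if buf: segments.append(("code", "".join(buf)))` — A's flush step
def emitCode (buf : List Char) (segs : List (String × String)) : List (String × String) :=
  if buf = [] then segs else ("code", String.ofList buf) :: segs

-- `line.find("*/", i+2)` (used by both Pythons): earliest "*/";
-- returns (chars up to and including "*/", remainder) or none
def findBC : List Char → Option (List Char × List Char)
  | [] => none
  | c :: t =>
    if c = '*' ∧ t.head? = some '/' then some (['*', '/'], t.tail)
    else (findBC t).map (fun p => (c :: p.1, p.2))

theorem findBC_rest_le : ∀ (l : List Char) s r, findBC l = some (s, r) → r.length ≤ l.length := by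
  intro l
  induction l with
  | nil => intro s r h; simp [findBC] at h
  | cons c t ih =>
    intro s r h
    rw [findBC] at h
    split at h
    · simp at h
      have : t.tail.length ≤ t.length := by cases t <;> simp
      simp [← h.2]; omega
    · cases hf : findBC t with
      | none => rw [hf] at h; simp at h
      | some p =>
        rw [hf] at h; simp at h
        have := ih p.1 p.2 (by rw [hf])
        have hr : r = p.2 := by rw [← h.2]
        simp [hr]; omega

-- A's inner scan: `while j < n: if line[j]=='\\': j+=2 elif line[j]==q: j+=1; break else: j+=1`
def scanA (q : Char) : List Char → List Char × List Char
  | [] => ([], [])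
  | c :: t =>
    if c = '\\' then
      match t with
      | [] => (['\\'], [])
      | d :: t' => let p := scanA q t'; ('\\' :: d :: p.1, p.2)
    else if c = q then ([c], t)
    else let p := scanA q t; (c :: p.1, p.2)

theorem scanA_rest_le (q : Char) : ∀ (n : Nat) (l : List Char), l.length ≤ n →
    (scanA q l).2.length ≤ l.length := by
  intro n
  induction n with
  | zero =>
    intro l hl
    have h0 : l = [] := List.length_eq_zero_iff.mp (by omega)
    subst h0; simp [scanA]
  | succ n ih =>
    intro l hl
    cases l with
    | nil => simp [scanA]
    | cons c t =>
      rw [scanA.eq_def]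
      simp only []
      split
      · cases t with
        | nil => simp
        | cons d t' =>
          have := ih t' (by simp at hl; omega)
          simp at this ⊢; omega
      · split
        · simp
        · have := ih t (by simp at hl; omega)
          simp at this ⊢; omega

-- A's main loop, on the remaining suffix `rest` with the pending code chars `buf`
def tokA (rest buf : List Char) : List (String × String) :=
  match rest with
  | [] => emitCode buf []
  | c :: t =>
    if c = '/' ∧ t.head? = some '/' then
      emitCode buf [("line_comment", String.ofList (c :: t))]
    else if c = '/' ∧ t.head? = some '*' then
      match hf : findBC t.tail with
      | some (seg, r) =>
        emitCode buf (("block_comment", String.ofList ('/' :: '*' :: seg)) :: tokA r [])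
      | none => emitCode buf [("block_start", String.ofList (c :: t))]
    else if c = '"' then
      emitCode buf (("string", String.ofList (c :: (scanA c t).1)) :: tokA (scanA c t).2 [])
    else if c = '\'' then
      emitCode buf (("char", String.ofList (c :: (scanA c t).1)) :: tokA (scanA c t).2 [])
    else
      tokA t (buf ++ [c])
termination_by rest.length
decreasing_by
  · have := findBC_rest_le t.tail seg r hf
    have : t.tail.length ≤ t.length := by cases t <;> simp
    simp; omega
  · have := scanA_rest_le c t.length t (le_refl _); simp; omega
  · have := scanA_rest_le c t.length t (le_refl _); simp; omega
  · simp

def tokenize_line (line : String) : List (String × String) := tokA line.toList []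

-- ===== PORT B =====

-- B's literal scan: escape-flag state machine
-- `ch=line[j]; j+=1; if esc: esc=False elif ch==q: break else: esc=(ch=='\\')`
def scanF (q : Char) (esc : Bool) : List Char → List Char × List Char
  | [] => ([], [])
  | c :: t =>
    if esc then
      let p := scanF q false t; (c :: p.1, p.2)
    else if c = q then ([c], t)
    else
      let p := scanF q (c = '\\') t; (c :: p.1, p.2)

theorem scanF_rest_le (q : Char) : ∀ (n : Nat) (l : List Char) (esc : Bool), l.length ≤ n →
    (scanF q esc l).2.length ≤ l.length := by
  intro n
  induction n with
  | zero =>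
    intro l esc hl
    have h0 : l = [] := List.length_eq_zero_iff.mp (by omega)
    subst h0; simp [scanF]
  | succ n ih =>
    intro l esc hl
    cases l with
    | nil => simp [scanF]
    | cons c t =>
      rw [scanF.eq_def]
      simp only []
      split
      · have := ih t false (by simp at hl; omega); simp at this ⊢; omega
      · split
        · simp
        · have := ih t (c = '\\') (by simp at hl; omega); simp at this ⊢; omega

-- B's first pass: one raw segment per event; code characters one at a time
def rawB (rest : List Char) : List (String × String) :=
  match rest with
  | [] => []
  | c :: t =>
    if c = '"' ∨ c = '\'' then
      ((if c = '"' then "string" else "char"), String.ofList (c :: (scanF c false t).1))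
        :: rawB (scanF c false t).2
    else if c = '/' ∧ t.head? = some '/' then
      [("line_comment", String.ofList (c :: t))]
    else if c = '/' ∧ t.head? = some '*' then
      match hf : findBC t.tail with
      | none => [("block_start", String.ofList (c :: t))]
      | some (seg, r) => ("block_comment", String.ofList ('/' :: '*' :: seg)) :: rawB r
    else
      ("code", String.ofList [c]) :: rawB t
termination_by rest.length
decreasing_by
  · have := scanF_rest_le c t.length t false (le_refl _); simp; omega
  · have := findBC_rest_le t.tail seg r hf
    have : t.tail.length ≤ t.length := by cases t <;> simp
    simp; omega
  · simp

-- B's second pass: coalesce consecutive 'code' pieces (pend = joined pending chars)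
def mergeCode (pend : List Char) : List (String × String) → List (String × String)
  | [] => if pend = [] then [] else [("code", String.ofList pend)]
  | (tag, s) :: rest =>
    if tag = "code" then mergeCode (pend ++ s.toList) rest
    else if pend = [] then (tag, s) :: mergeCode [] rest
    else ("code", String.ofList pend) :: (tag, s) :: mergeCode [] rest

def tokenize_line_alt (line : String) : List (String × String) := mergeCode [] (rawB line.toList)

-- ===== PRECONDITION & SPEC =====
def Spec_tokenize_line (line : String) (out : List (String × String)) : Prop := out = tokenize_line_alt line
instance (line : String) (out : List (String × String)) : Decidable (Spec_tokenize_line line out) := by unfold Spec_tokenize_line; infer_instance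

-- ===== CLAIM (what is proved, stated in full; the proofs are below) =====
def Claim_equal_tokenize_line : Prop := ∀ (line : String), Dom_tokenize_line line → Spec_tokenize_line line (tokenize_line line)

-- ===== LEMMAS AND PROOFS =====

theorem scanA_eq_scanF (q : Char) (hq : q ≠ '\\') : ∀ (n : Nat) (l : List Char), l.length ≤ n →
    scanA q l = scanF q false l := by
  intro n
  induction n with
  | zero =>
    intro l hl
    have h0 : l = [] := List.length_eq_zero_iff.mp (by omega)
    subst h0; simp [scanA, scanF]
  | succ n ih =>
    intro l hl
    cases l with
    | nil => simp [scanA, scanF]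
    | cons c t =>
      rw [scanA.eq_def, scanF.eq_def]
      simp only [Bool.false_eq_true, if_false]
      by_cases hc : c = '\\'
      · subst hc
        simp only [Ne.symm hq, if_false]
        cases t with
        | nil => simp [scanF]
        | cons d t' =>
          rw [scanF.eq_def]
          simp [ih t' (by simp at hl; omega)]
      · by_cases hcq : c = q
        · simp [hcq, hq]
        · simp [hc, hcq, ih t (by simp at hl; omega)]

theorem mergeCode_nil (pend : List Char) : mergeCode pend [] = emitCode pend [] := by
  simp [mergeCode, emitCode]

theorem emitCode_nil : emitCode [] [] = [] := by simp [emitCode]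

theorem mergeCode_cons (pend : List Char) (tag s : String) (rest : List (String × String)) :
    mergeCode pend ((tag, s) :: rest) =
      if tag = "code" then mergeCode (pend ++ s.toList) rest
      else emitCode pend ((tag, s) :: mergeCode [] rest) := by
  rw [mergeCode]
  by_cases hp : pend = [] <;> by_cases ht : tag = "code" <;> simp [hp, ht, emitCode]

theorem tokA_eq_merge_raw : ∀ (n : Nat) (rest : List Char), rest.length ≤ n →
    ∀ (buf : List Char), tokA rest buf = mergeCode buf (rawB rest) := by
  intro n
  induction n with
  | zero =>
    intro rest hl buf
    have h0 : rest = [] := List.length_eq_zero_iff.mp (by omega)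
    subst h0
    rw [tokA.eq_def, rawB.eq_def, mergeCode_nil]
  | succ n ih =>
    intro rest hl buf
    cases rest with
    | nil => rw [tokA.eq_def, rawB.eq_def, mergeCode_nil]
    | cons c t =>
      simp at hl
      rw [tokA.eq_def, rawB.eq_def]
      by_cases hq : c = '"' ∨ c = '\''
      · have hslash : ¬ (c = '/' ∧ t.head? = some '/') := by
          rcases hq with h | h <;> subst h <;> simp
        have hslash2 : ¬ (c = '/' ∧ t.head? = some '*') := by
          rcases hq with h | h <;> subst h <;> simp
        have hne : c ≠ '\\' := by rcases hq with h | h <;> subst h <;> decide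
        have hs := scanA_eq_scanF c hne t.length t (le_refl _)
        have hrl := scanF_rest_le c t.length t false (le_refl _)
        rcases hq with h | h <;> subst h
        · have hih := ih (scanF '"' false t).2 (by omega) ([] : List Char)
          simp [hs, mergeCode_cons, emitCode, hih]
        · have hih := ih (scanF '\'' false t).2 (by omega) ([] : List Char)
          simp [hs, mergeCode_cons, emitCode, hih]
      · have hq1 : c ≠ '"' := fun h => hq (Or.inl h)
        have hq2 : c ≠ '\'' := fun h => hq (Or.inr h)
        simp only [if_neg hq]
        by_cases h1 : c = '/' ∧ t.head? = some '/'
        · simp [h1, mergeCode_cons, mergeCode_nil, emitCode_nil]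
        · simp only [if_neg h1]
          by_cases h2 : c = '/' ∧ t.head? = some '*'
          · simp only [if_pos h2]
            cases hf : findBC t.tail with
            | none => simp [mergeCode_cons, mergeCode_nil, emitCode_nil]
            | some p =>
              obtain ⟨seg, r⟩ := p
              have hr := findBC_rest_le t.tail seg r hf
              have ht : t.tail.length ≤ t.length := by cases t <;> simp
              simp [mergeCode_cons, ih r (by omega) []]
          · simp only [if_neg h2, if_neg hq1, if_neg hq2]
            rw [mergeCode_cons]
            simp [ih t (by omega) (buf ++ [c])]

-- ===== VERDICT (by name: the statement is the Claim_ definition above) =====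
theorem tokenize_line_spec : Claim_equal_tokenize_line := by
  intro line _
  unfold Spec_tokenize_line tokenize_line tokenize_line_alt
  exact tokA_eq_merge_raw line.toList.length line.toList (le_refl _) []
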